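-- pv_equiv track=rewrite | github.com/hiroakinsm/cobol-analyzer | tests/test_data/src/analyzer/analysis_engine.py | _evaluate_header_quality
-- ===== SOURCE A (Python) =====
-- from typing import Dict, Any, List, Optional
--
-- def _evaluate_header_quality(ast: Dict[str, Any]) -> str:
--     """ヘッダーコメントの品質評価"""
--     source_lines = ast.get('source_lines', [])
--     header_lines = []
--
--     for line in source_lines:
--         if line.strip().startswith(('*', '/')):
--             header_lines.append(line)
--         elif line.strip() and not line.strip().startswith(('*', '/')):
--             break
--
--     # ヘッダー品質の評価基準
--     required_elements = ['PROGRAM-ID', 'AUTHOR', 'DATE', 'PURPOSE']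
--     found_elements = sum(1 for elem in required_elements if any(elem in line.upper() for line in header_lines))
--
--     if found_elements >= len(required_elements):
--         return 'HIGH'
--     elif found_elements >= len(required_elements) // 2:
--         return 'MEDIUM'
--     else:
--         return 'LOW'
-- ===== SOURCE B (Python) =====
-- def _evaluate_header_quality(ast):
--     """One-pass header quality rating: accumulate found elements in a set."""
--     required = ('PROGRAM-ID', 'AUTHOR', 'DATE', 'PURPOSE')
--     found = set()
--     for line in ast.get('source_lines', []):
--         stripped = line.strip()
--         if stripped.startswith(('*', '/')):
--             u = line.upper()
--             for elem in required:
--                 if elem in u: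
--                     found.add(elem)
--         elif stripped:
--             break
--     if len(found) >= 4:
--         return 'HIGH'
--     if len(found) >= 2:
--         return 'MEDIUM'
--     return 'LOW'
-- ===== Notes on version B (the rewrite author's own statement) =====
-- stated objective: simpler
-- what changed: B replaces A's collect-header-lines pass followed by four per-element rescans with a single accumulating traversal of source_lines that adds matched required elements to a set and maps the set's size to the rating.
import Mathlib
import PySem

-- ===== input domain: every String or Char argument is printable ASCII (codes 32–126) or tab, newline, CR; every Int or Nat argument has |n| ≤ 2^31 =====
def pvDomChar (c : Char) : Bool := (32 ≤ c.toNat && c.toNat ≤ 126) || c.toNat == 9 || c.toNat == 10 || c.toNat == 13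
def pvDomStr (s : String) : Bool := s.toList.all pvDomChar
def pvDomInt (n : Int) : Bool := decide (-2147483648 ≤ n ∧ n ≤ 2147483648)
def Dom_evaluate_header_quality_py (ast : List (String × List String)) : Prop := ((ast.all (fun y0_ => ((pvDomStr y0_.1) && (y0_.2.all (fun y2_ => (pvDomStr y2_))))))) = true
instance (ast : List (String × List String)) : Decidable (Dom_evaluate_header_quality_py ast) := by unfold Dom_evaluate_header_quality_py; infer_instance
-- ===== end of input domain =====

-- B does A's job in ONE pass over source_lines, accumulating matched elements in a set,
-- instead of A's collect-the-header-lines pass followed by four rescans (objective: simpler decomposition, not faster).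

-- ===== PORT A =====
def pvRequiredA : List String := ["PROGRAM-ID", "AUTHOR", "DATE", "PURPOSE"]

-- the header-collecting loop of A, with its break
def pvCollectHeaders : List String → List String
  | [] => []
  | line :: rest =>
    if PySem.Str.startswith (PySem.Str.strip line) "*" || PySem.Str.startswith (PySem.Str.strip line) "/" then
      line :: pvCollectHeaders rest
    else if PySem.Str.strip line ≠ "" ∧ ¬ (PySem.Str.startswith (PySem.Str.strip line) "*" || PySem.Str.startswith (PySem.Str.strip line) "/") = true then
      []  -- break
    else
      pvCollectHeaders rest

def evaluate_header_quality_py (ast : List (String × List String)) : String :=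
  let source_lines := (PySem.Dict.mk ast).getD "source_lines" []
  let header_lines := pvCollectHeaders source_lines
  let found_elements :=
    (pvRequiredA.filter (fun elem => header_lines.any (fun line => PySem.Str.isIn elem (PySem.Str.upper line)))).length
  if found_elements ≥ pvRequiredA.length then "HIGH"
  else if found_elements ≥ pvRequiredA.length / 2 then "MEDIUM"
  else "LOW"

-- ===== PORT B =====
def pvRequiredB : List String := ["PROGRAM-ID", "AUTHOR", "DATE", "PURPOSE"]

-- inner loop of B: add every required element contained in u to the set
def pvAddFound (found : PySem.Set String) (u : String) : PySem.Set String :=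
  pvRequiredB.foldl (fun f elem => if PySem.Str.isIn elem u then PySem.Set.add f elem else f) found

-- B's single accumulating traversal, with the same break
def pvLoopB : List String → PySem.Set String → PySem.Set String
  | [], found => found
  | line :: rest, found =>
    let stripped := PySem.Str.strip line
    if PySem.Str.startswith stripped "*" || PySem.Str.startswith stripped "/" then
      pvLoopB rest (pvAddFound found (PySem.Str.upper line))
    else if stripped ≠ "" then found  -- break
    else pvLoopB rest found

def evaluate_header_quality_py_alt (ast : List (String × List String)) : String :=
  let found := pvLoopB ((PySem.Dict.mk ast).getD "source_lines" []) PySem.Set.empty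
  if PySem.Set.len found ≥ 4 then "HIGH"
  else if PySem.Set.len found ≥ 2 then "MEDIUM"
  else "LOW"

-- ===== PRECONDITION & SPEC =====
def Spec_evaluate_header_quality_py (ast : List (String × List String)) (out : String) : Prop := out = evaluate_header_quality_py_alt ast
instance (ast : List (String × List String)) (out : String) : Decidable (Spec_evaluate_header_quality_py ast out) := by unfold Spec_evaluate_header_quality_py; infer_instance

-- ===== CLAIM (what is proved, stated in full; the proofs are below) =====
def Claim_equal_evaluate_header_quality_py : Prop := ∀ (ast : List (String × List String)), Dom_evaluate_header_quality_py ast → Spec_evaluate_header_quality_py ast (evaluate_header_quality_py ast)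

-- ===== LEMMAS AND PROOFS =====

lemma mem_foldl_add (req : List String) (p : String → Bool) (found : PySem.Set String) (e : String) :
    e ∈ req.foldl (fun f elem => if p elem then PySem.Set.add f elem else f) found ↔
      e ∈ found ∨ (e ∈ req ∧ p e = true) := by
  induction req generalizing found with
  | nil => simp
  | cons x xs ih =>
    simp only [List.foldl_cons, ih, List.mem_cons]
    by_cases hx : p x = true
    · simp [hx, PySem.Set.mem_add]
      constructor
      · rintro ((h | rfl) | h)
        · exact Or.inl h
        · exact Or.inr ⟨Or.inl rfl, hx⟩
        · exact Or.inr ⟨Or.inr h.1, h.2⟩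
      · rintro (h | ⟨(rfl | h), hp⟩)
        · exact Or.inl (Or.inl h)
        · exact Or.inl (Or.inr rfl)
        · exact Or.inr ⟨h, hp⟩
    · simp only [hx, if_neg Bool.false_ne_true]
      constructor
      · rintro (h | h)
        · exact Or.inl h
        · exact Or.inr ⟨Or.inr h.1, h.2⟩
      · rintro (h | ⟨(rfl | h), hp⟩)
        · exact Or.inl h
        · exact absurd hp hx
        · exact Or.inr ⟨h, hp⟩

lemma mem_pvAddFound (found : PySem.Set String) (u e : String) :
    e ∈ pvAddFound found u ↔ e ∈ found ∨ (e ∈ pvRequiredB ∧ PySem.Str.isIn e u = true) := by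
  unfold pvAddFound
  exact mem_foldl_add _ _ _ _

lemma nodup_foldl_add (req : List String) (p : String → Bool) (found : PySem.Set String) (h : found.Nodup) :
    (req.foldl (fun f elem => if p elem then PySem.Set.add f elem else f) found).Nodup := by
  induction req generalizing found with
  | nil => exact h
  | cons x xs ih =>
    simp only [List.foldl_cons]
    by_cases hx : p x = true
    · exact ih _ (by simpa [hx] using PySem.Set.nodup_add found x h)
    · simpa [hx] using ih _ h

lemma nodup_pvAddFound (found : PySem.Set String) (u : String) (h : found.Nodup) :
    (pvAddFound found u).Nodup := by
  unfold pvAddFound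
  exact nodup_foldl_add _ _ _ h

lemma pvLoopB_cons_hdr (line : String) (rest : List String) (found : PySem.Set String)
    (h : (PySem.Str.startswith (PySem.Str.strip line) "*" || PySem.Str.startswith (PySem.Str.strip line) "/") = true) :
    pvLoopB (line :: rest) found = pvLoopB rest (pvAddFound found (PySem.Str.upper line)) := by
  simp only [pvLoopB]; rw [h]; simp

lemma pvLoopB_cons_blank (line : String) (rest : List String) (found : PySem.Set String)
    (h : (PySem.Str.startswith (PySem.Str.strip line) "*" || PySem.Str.startswith (PySem.Str.strip line) "/") = false)
    (hS : PySem.Str.strip line = "") :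
    pvLoopB (line :: rest) found = pvLoopB rest found := by
  simp only [pvLoopB]; rw [h, hS]; simp

lemma pvLoopB_cons_break (line : String) (rest : List String) (found : PySem.Set String)
    (h : (PySem.Str.startswith (PySem.Str.strip line) "*" || PySem.Str.startswith (PySem.Str.strip line) "/") = false)
    (hS : ¬ PySem.Str.strip line = "") :
    pvLoopB (line :: rest) found = found := by
  simp only [pvLoopB]; rw [h]; simp [hS]

lemma pvCollect_cons_hdr (line : String) (rest : List String)
    (h : (PySem.Str.startswith (PySem.Str.strip line) "*" || PySem.Str.startswith (PySem.Str.strip line) "/") = true) :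
    pvCollectHeaders (line :: rest) = line :: pvCollectHeaders rest := by
  simp only [pvCollectHeaders]; rw [h]; simp

lemma pvCollect_cons_blank (line : String) (rest : List String)
    (h : (PySem.Str.startswith (PySem.Str.strip line) "*" || PySem.Str.startswith (PySem.Str.strip line) "/") = false)
    (hS : PySem.Str.strip line = "") :
    pvCollectHeaders (line :: rest) = pvCollectHeaders rest := by
  simp only [pvCollectHeaders]; rw [h, hS]; simp

lemma pvCollect_cons_break (line : String) (rest : List String)
    (h : (PySem.Str.startswith (PySem.Str.strip line) "*" || PySem.Str.startswith (PySem.Str.strip line) "/") = false)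
    (hS : ¬ PySem.Str.strip line = "") :
    pvCollectHeaders (line :: rest) = [] := by
  simp only [pvCollectHeaders]; rw [h]; simp [hS]

lemma mem_pvLoopB (lines : List String) (found : PySem.Set String) (e : String) :
    e ∈ pvLoopB lines found ↔
      e ∈ found ∨ (e ∈ pvRequiredB ∧
        (pvCollectHeaders lines).any (fun l => PySem.Str.isIn e (PySem.Str.upper l)) = true) := by
  induction lines generalizing found with
  | nil => simp [pvLoopB, pvCollectHeaders]
  | cons line rest ih =>
    by_cases hH : (PySem.Str.startswith (PySem.Str.strip line) "*" || PySem.Str.startswith (PySem.Str.strip line) "/") = true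
    · rw [pvLoopB_cons_hdr line rest found hH, pvCollect_cons_hdr line rest hH,
        ih, mem_pvAddFound]
      simp only [List.any_cons, Bool.or_eq_true]
      rw [or_assoc, and_or_left]
    · rw [Bool.not_eq_true] at hH
      by_cases hS : PySem.Str.strip line = ""
      · rw [pvLoopB_cons_blank line rest found hH hS, pvCollect_cons_blank line rest hH hS]
        exact ih found
      · rw [pvLoopB_cons_break line rest found hH hS, pvCollect_cons_break line rest hH hS]
        simp

lemma nodup_pvLoopB (lines : List String) (found : PySem.Set String) (h : found.Nodup) :
    (pvLoopB lines found).Nodup := by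
  induction lines generalizing found with
  | nil => exact h
  | cons line rest ih =>
    by_cases hH : (PySem.Str.startswith (PySem.Str.strip line) "*" || PySem.Str.startswith (PySem.Str.strip line) "/") = true
    · rw [pvLoopB_cons_hdr line rest found hH]
      exact ih _ (nodup_pvAddFound _ _ h)
    · rw [Bool.not_eq_true] at hH
      by_cases hS : PySem.Str.strip line = ""
      · rw [pvLoopB_cons_blank line rest found hH hS]; exact ih _ h
      · rw [pvLoopB_cons_break line rest found hH hS]; exact h

-- ===== VERDICT (by name: the statement is the Claim_ definition above) =====
lemma len_pvLoopB_empty (lines : List String) :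
    PySem.Set.len (pvLoopB lines PySem.Set.empty) =
      (pvRequiredA.filter (fun elem =>
        (pvCollectHeaders lines).any (fun line => PySem.Str.isIn elem (PySem.Str.upper line)))).length := by
  have hperm : (pvLoopB lines PySem.Set.empty).Perm
      (pvRequiredA.filter (fun elem =>
        (pvCollectHeaders lines).any (fun line => PySem.Str.isIn elem (PySem.Str.upper line)))) := by
    rw [List.perm_ext_iff_of_nodup (nodup_pvLoopB _ _ (by simp [PySem.Set.empty]))
      (List.Nodup.filter _ (by decide))]
    intro e
    rw [mem_pvLoopB, List.mem_filter]
    simp [PySem.Set.empty, pvRequiredA, pvRequiredB]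
  simpa [PySem.Set.len] using hperm.length_eq

theorem evaluate_header_quality_py_spec : Claim_equal_evaluate_header_quality_py := by
  unfold Claim_equal_evaluate_header_quality_py Spec_evaluate_header_quality_py
  intro ast _
  unfold evaluate_header_quality_py evaluate_header_quality_py_alt
  simp only [len_pvLoopB_empty]
  have h4 : pvRequiredA.length = 4 := rfl
  rw [h4]
  norm_num
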